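-- pv_equiv track=rewrite | github.com/przychlaast/algorithms | lista_2/zadania1_5.py | heapify3_plus
-- ===== SOURCE A (Python) =====
-- def heapify3_plus(A, i, rozmiar_kopca, przypisania, porownania):
--     l = 3*i + 1
--     m = 3*i + 2
--     r = 3*i + 3
--     najwiekszy = i
--     przypisania += 4
--     porownania += 7
--     if l < rozmiar_kopca and A[l] > A[najwiekszy]:
--         najwiekszy = l
--         przypisania += 1
--     if m < rozmiar_kopca and A[m] > A[najwiekszy]:
--         najwiekszy = m
--         przypisania += 1
--     if r < rozmiar_kopca and A[r] > A[najwiekszy]: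
--         najwiekszy = r
--         przypisania += 1
--     if najwiekszy != i:
--         A[i], A[najwiekszy] = A[najwiekszy], A[i]
--         przypisania += 2
--         A, przypisania, porownania = heapify3_plus(A, najwiekszy, rozmiar_kopca, przypisania, porownania)
--     return A, przypisania, porownania
-- ===== SOURCE B (Python) =====
-- def heapify3_plus(A, i, rozmiar_kopca, przypisania, porownania):
--     # iterative sift-down: while-loop over the descending index, inner for over the three children
--     # (mutates A in place with the same swaps as the recursive version)
--     while True:
--         przypisania += 4
--         porownania += 7
--         najwiekszy = i
--         for j in range(3*i + 1, 3*i + 4):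
--             if j < rozmiar_kopca and A[j] > A[najwiekszy]:
--                 najwiekszy = j
--                 przypisania += 1
--         if najwiekszy == i:
--             return A, przypisania, porownania
--         A[i], A[najwiekszy] = A[najwiekszy], A[i]
--         przypisania += 2
--         i = najwiekszy
-- ===== Notes on version B (the rewrite author's own statement) =====
-- stated objective: simpler
-- what changed: The tail recursion with three unrolled child-checks is replaced by an iterative while-loop over the descending index with an inner for-loop over the three children; counters are incremented in the same places, so results are identical.
-- outside the precondition, e.g. on heapify3_plus([1, 2, 3], -1, 2, 0, 0): A returns ([1, 2, 3], 4, 7), B returns ([1, 2, 3], 4, 7)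
import Mathlib
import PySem

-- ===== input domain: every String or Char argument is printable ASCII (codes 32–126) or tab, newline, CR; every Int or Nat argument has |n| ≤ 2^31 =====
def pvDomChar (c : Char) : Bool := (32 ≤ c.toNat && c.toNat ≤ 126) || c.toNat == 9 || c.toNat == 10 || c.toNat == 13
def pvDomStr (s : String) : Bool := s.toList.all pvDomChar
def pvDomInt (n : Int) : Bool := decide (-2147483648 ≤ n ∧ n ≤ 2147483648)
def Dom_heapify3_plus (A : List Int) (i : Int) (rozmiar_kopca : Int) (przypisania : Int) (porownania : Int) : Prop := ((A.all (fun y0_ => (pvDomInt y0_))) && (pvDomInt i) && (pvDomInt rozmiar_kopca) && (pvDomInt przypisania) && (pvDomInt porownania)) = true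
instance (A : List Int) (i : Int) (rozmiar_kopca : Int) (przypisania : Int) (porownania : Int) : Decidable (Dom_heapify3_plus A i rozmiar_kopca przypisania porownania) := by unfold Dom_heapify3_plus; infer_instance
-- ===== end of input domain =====

-- B replaces the tail recursion (three unrolled if-blocks) by an iterative loop with an inner
-- for-loop over the three children: same swaps, same counter increments, same return value.
-- Both Pythons mutate A in place with the same swaps; the equivalence proved is about the return value.

-- ===== PORT A =====
-- A's tail recursion is well-founded only inside Pre_ (i increases towards rozmiar_kopca), so the
-- port carries a fuel parameter (rozmiar_kopca.toNat + 1 iterations always suffice inside Pre_);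
-- list reads/writes use pyGetD/pySetD, exact on Pre_ where every performed access is in range.
def pvGetA (A : List Int) (j : Int) : Int := PySem.List.pyGetD A j 0

def heapify3A : Nat → List Int → Int → Int → Int → Int → List Int × Int × Int
  | 0, A, _, _, przypisania, porownania => (A, przypisania, porownania)  -- fuel guard, unreachable inside Pre_
  | fuel + 1, A, i, rozmiar_kopca, przypisania, porownania =>
    let l := 3*i + 1
    let m := 3*i + 2
    let r := 3*i + 3
    let najwiekszy := i
    let przypisania := przypisania + 4
    let porownania := porownania + 7
    let (najwiekszy, przypisania) :=
      if l < rozmiar_kopca ∧ pvGetA A l > pvGetA A najwiekszy then (l, przypisania + 1)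
      else (najwiekszy, przypisania)
    let (najwiekszy, przypisania) :=
      if m < rozmiar_kopca ∧ pvGetA A m > pvGetA A najwiekszy then (m, przypisania + 1)
      else (najwiekszy, przypisania)
    let (najwiekszy, przypisania) :=
      if r < rozmiar_kopca ∧ pvGetA A r > pvGetA A najwiekszy then (r, przypisania + 1)
      else (najwiekszy, przypisania)
    if najwiekszy ≠ i then
      let vi := pvGetA A i
      let vn := pvGetA A najwiekszy
      let A := PySem.List.pySetD (PySem.List.pySetD A i vn) najwiekszy vi
      heapify3A fuel A najwiekszy rozmiar_kopca (przypisania + 2) porownania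
    else
      (A, przypisania, porownania)

def heapify3_plus (A : List Int) (i : Int) (rozmiar_kopca : Int) (przypisania : Int) (porownania : Int) : List Int × Int × Int :=
  heapify3A (rozmiar_kopca.toNat + 1) A i rozmiar_kopca przypisania porownania

-- ===== PORT B =====
-- the inner 'for j in range(3*i+1, 3*i+4)' of Source B, folding over (najwiekszy, przypisania)
def childScan (A : List Int) (i rozmiar_kopca przypisania : Int) : Int × Int :=
  (PySem.List.pyRange (3*i + 1) (3*i + 4) 1).foldl
    (fun s j => if j < rozmiar_kopca ∧ pvGetA A j > pvGetA A s.1 then (j, s.2 + 1) else s)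
    (i, przypisania)

-- the 'while True' loop of Source B, with the same fuel guard as port A
def heapify3B : Nat → List Int → Int → Int → Int → Int → List Int × Int × Int
  | 0, A, _, _, przypisania, porownania => (A, przypisania, porownania)  -- fuel guard, unreachable inside Pre_
  | fuel + 1, A, i, rozmiar_kopca, przypisania, porownania =>
    let przypisania := przypisania + 4
    let porownania := porownania + 7
    let (najwiekszy, przypisania) := childScan A i rozmiar_kopca przypisania
    if najwiekszy = i then
      (A, przypisania, porownania)
    else
      let vi := pvGetA A i
      let vn := pvGetA A najwiekszy
      heapify3B fuel (PySem.List.pySetD (PySem.List.pySetD A i vn) najwiekszy vi)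
        najwiekszy rozmiar_kopca (przypisania + 2) porownania

def heapify3_plus_alt (A : List Int) (i : Int) (rozmiar_kopca : Int) (przypisania : Int) (porownania : Int) : List Int × Int × Int :=
  heapify3B (rozmiar_kopca.toNat + 1) A i rozmiar_kopca przypisania porownania

-- ===== PRECONDITION & SPEC =====
-- Pre_ excludes the inputs where A raises IndexError, plus the negative-index-wraparound and
-- heap-size-beyond-list-length corners where Python's indexing semantics rather than the sift-down
-- determine the outcome (there both Pythons still behave identically, but the ports' plain
-- in-range reads do not model wraparound): it keeps the immediate-return case rozmiar_kopca ≤ 3*i+1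
-- and the proper sift-down domain 0 ≤ i with rozmiar_kopca ≤ len(A).
def Pre_heapify3_plus (A : List Int) (i : Int) (rozmiar_kopca : Int) (przypisania : Int) (porownania : Int) : Prop :=
  rozmiar_kopca ≤ 3*i + 1 ∨ (0 ≤ i ∧ rozmiar_kopca ≤ A.length)
instance (A : List Int) (i : Int) (rozmiar_kopca : Int) (przypisania : Int) (porownania : Int) : Decidable (Pre_heapify3_plus A i rozmiar_kopca przypisania porownania) := by unfold Pre_heapify3_plus; infer_instance

def pvWitness_heapify3_plus : List Int × Int × Int × Int × Int := ([1, 5, 3, 2], 0, 4, 0, 0)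

def Spec_heapify3_plus (A : List Int) (i : Int) (rozmiar_kopca : Int) (przypisania : Int) (porownania : Int) (out : List Int × Int × Int) : Prop := out = heapify3_plus_alt A i rozmiar_kopca przypisania porownania
instance (A : List Int) (i : Int) (rozmiar_kopca : Int) (przypisania : Int) (porownania : Int) (out : List Int × Int × Int) : Decidable (Spec_heapify3_plus A i rozmiar_kopca przypisania porownania out) := by unfold Spec_heapify3_plus; infer_instance

-- ===== CLAIM (what is proved, stated in full; the proofs are below) =====
def Claim_equal_heapify3_plus : Prop := ∀ (A : List Int) (i : Int) (rozmiar_kopca : Int) (przypisania : Int) (porownania : Int), Dom_heapify3_plus A i rozmiar_kopca przypisania porownania → Pre_heapify3_plus A i rozmiar_kopca przypisania porownania → Spec_heapify3_plus A i rozmiar_kopca przypisania porownania (heapify3_plus A i rozmiar_kopca przypisania porownania)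

-- ===== LEMMAS AND PROOFS =====
lemma pyRange_three (i : Int) :
    PySem.List.pyRange (3*i + 1) (3*i + 4) 1 = [3*i + 1, 3*i + 2, 3*i + 3] := by
  rw [PySem.List.pyRange_one_cons (by omega), PySem.List.pyRange_one_cons (by omega),
      PySem.List.pyRange_one_cons (by omega), PySem.List.pyRange_one_eq_nil (by omega)]
  norm_num
  constructor <;> ring

lemma childScan_eq (A : List Int) (i rk p : Int) :
    childScan A i rk p =
      (let s := if 3*i+1 < rk ∧ pvGetA A (3*i+1) > pvGetA A i then (3*i+1, p + 1) else (i, p)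
       let s := if 3*i+2 < rk ∧ pvGetA A (3*i+2) > pvGetA A s.1 then (3*i+2, s.2 + 1) else s
       if 3*i+3 < rk ∧ pvGetA A (3*i+3) > pvGetA A s.1 then (3*i+3, s.2 + 1) else s) := by
  simp only [childScan, pyRange_three, List.foldl_cons, List.foldl_nil]

lemma heapify3AB (fuel : Nat) : ∀ (A : List Int) (i rk p c : Int),
    heapify3A fuel A i rk p c = heapify3B fuel A i rk p c := by
  induction fuel with
  | zero => intro A i rk p c; rfl
  | succ n ih =>
    intro A i rk p c
    simp only [heapify3A, heapify3B, childScan_eq, ih, ite_not]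

-- ===== VERDICT (by name: the statement is the Claim_ definition above) =====
theorem heapify3_plus_spec : Claim_equal_heapify3_plus := by
  intro A i rk p c _ _
  unfold Spec_heapify3_plus heapify3_plus heapify3_plus_alt
  exact heapify3AB _ A i rk p c
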